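-- pv_equiv track=rewrite | github.com/Thyagaraja9573/Projects | miniplus/ARCH/20190907a_miniplus.py | fNewArray
-- ===== SOURCE A (Python) =====
-- def fNewArray(s,a):
--     tot = 0
--     lNewArray = []
--     for i in a:
--         if tot < s:
--             lNewArray.append(i)
--             tot = tot+i
--     return lNewArray
-- ===== SOURCE B (Python) =====
-- from itertools import accumulate
--
-- def fNewArray(s, a):
--     # prefix sums S[0..n] with S[0]=0; answer is a[:k] for the first k with S[k] >= s
--     for k, t in enumerate(accumulate(a, initial=0)):
--         if t >= s:
--             return a[:k]
--     return a[:]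
-- ===== Notes on version B (the rewrite author's own statement) =====
-- stated objective: alternative
-- what changed: B replaces A's element-by-element list building with guarded running total by a prefix-sum table (accumulate) scanned for the first sum >= s, returning the slice a[:k].
import Mathlib
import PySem

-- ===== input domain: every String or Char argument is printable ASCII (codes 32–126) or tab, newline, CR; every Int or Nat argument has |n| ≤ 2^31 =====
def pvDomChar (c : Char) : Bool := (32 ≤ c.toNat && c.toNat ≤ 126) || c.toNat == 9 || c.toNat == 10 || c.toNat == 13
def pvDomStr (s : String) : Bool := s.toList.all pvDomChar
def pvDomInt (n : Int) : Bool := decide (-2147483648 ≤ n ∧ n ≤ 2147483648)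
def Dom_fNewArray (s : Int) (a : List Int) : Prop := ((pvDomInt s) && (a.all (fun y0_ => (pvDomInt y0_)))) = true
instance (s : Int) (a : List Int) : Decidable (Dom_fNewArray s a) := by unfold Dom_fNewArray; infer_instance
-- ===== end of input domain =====

-- B replaces A's element-by-element list building (guarded by a running total) with a
-- prefix-sum table scanned for the first sum ≥ s, returning the slice a[:k]. Objective: alternative.

-- ===== PORT A =====
-- the for-loop over a with state (tot, lNewArray)
def fNewArray (s : Int) (a : List Int) : List Int :=
  (a.foldl (fun (st : Int × List Int) i =>
      if st.1 < s then (st.1 + i, st.2 ++ [i]) else st) (0, [])).2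

-- ===== PORT B =====
-- prefix sums S[0..n] with S[0]=0 (accumulate with initial=0), then first k with S[k] ≥ s
def fNewArray_alt (s : Int) (a : List Int) : List Int :=
  match (List.scanl (· + ·) 0 a).findIdx? (fun t => decide (s ≤ t)) with
  | some k => a.take k
  | none => a

-- ===== PRECONDITION & SPEC =====
def Spec_fNewArray (s : Int) (a : List Int) (out : List Int) : Prop := out = fNewArray_alt s a
instance (s : Int) (a : List Int) (out : List Int) : Decidable (Spec_fNewArray s a out) := by unfold Spec_fNewArray; infer_instance

-- ===== CLAIM (what is proved, stated in full; the proofs are below) =====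
def Claim_equal_fNewArray : Prop := ∀ (s : Int) (a : List Int), Dom_fNewArray s a → Spec_fNewArray s a (fNewArray s a)

-- ===== LEMMAS AND PROOFS =====

theorem foldl_frozen (s tot : Int) (acc : List Int) (a : List Int) (h : ¬ tot < s) :
    a.foldl (fun (st : Int × List Int) i =>
      if st.1 < s then (st.1 + i, st.2 ++ [i]) else st) (tot, acc) = (tot, acc) := by
  induction a with
  | nil => rfl
  | cons i rest ih => simp [List.foldl, h, ih]

theorem loop_eq_scan (s : Int) (a : List Int) (tot : Int) (acc : List Int) :
    (a.foldl (fun (st : Int × List Int) i =>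
      if st.1 < s then (st.1 + i, st.2 ++ [i]) else st) (tot, acc)).2 =
    acc ++ (match (List.scanl (· + ·) tot a).findIdx? (fun t => decide (s ≤ t)) with
            | some k => a.take k
            | none => a) := by
  induction a generalizing tot acc with
  | nil =>
    by_cases h : s ≤ tot <;>
      simp [List.scanl_nil, List.findIdx?_cons, List.findIdx?_nil, h]
  | cons i rest ih =>
    by_cases h : tot < s
    · have hsle : ¬ s ≤ tot := by omega
      rw [List.scanl_cons, List.foldl_cons, if_pos h]
      rw [ih (tot + i) (acc ++ [i])]
      rw [List.findIdx?_cons]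
      simp only [hsle, decide_eq_true_eq]
      cases hf : (List.scanl (· + ·) (tot + i) rest).findIdx? (fun t => decide (s ≤ t)) with
      | none => simp
      | some k => simp [List.take_succ_cons]
    · have hsle : s ≤ tot := by omega
      rw [List.foldl_cons, if_neg h, foldl_frozen s tot acc rest h]
      rw [List.scanl_cons, List.findIdx?_cons]
      simp [hsle]

-- ===== VERDICT (by name: the statement is the Claim_ definition above) =====
theorem fNewArray_spec : Claim_equal_fNewArray := by
  intro s a _
  unfold Spec_fNewArray fNewArray fNewArray_alt
  rw [loop_eq_scan]
  simp
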